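-- pv_equiv track=rewrite | github.com/dodoyeon/SW_Academy | DP/15489_pascaltri.py | pascaltri
-- ===== SOURCE A (Python) =====
-- def pascaltri(r, c, w):
--     h = (r+w-1)
--     d = [[0]*(i+1) for i in range(h)]
--     # total = (h*(h+1)//2)
--     # d = [0]*total
--     # d[0], d[1], d[2] = 1, 1, 1
--     d[0][0], d[1][0], d[1][1] = 1, 1, 1
--     num = 0
--     for i in range(h):
--         if i == 0:
--             d[0][0] = 1
--         elif i == 1:
--             d[1][0], d[1][1] = 1, 1
--         for j in range(i+1):
--             if j == 0 or j == i:
--                 d[i][j] = 1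
--             else:
--                 d[i][j] = d[i-1][j-1]+d[i-1][j]
--             if (r<=i+1<=h) and (c<=j+1<=c-(r-i)+1):
--                 num += d[i][j]
--     return num
-- ===== SOURCE B (Python) =====
-- def _binom(n, k):
--     # C(n, k) via the multiplicative formula; 0 when k is outside [0, n].
--     if k < 0 or n < k:
--         return 0
--     b = 1
--     for t in range(k):
--         b = b * (n - t) // (t + 1)
--     return b
--
--
-- def pascaltri(r, c, w):
--     # Sum binomial coefficients C(i, j) directly over the queried sub-triangle
--     # (rows r-1 .. r+w-2, columns c-1 .. c-1+(i-(r-1)), clipped to the triangle),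
--     # instead of building the whole Pascal triangle of height r+w-1.
--     h = r + w - 1
--     lo = max(r - 1, 0)
--     jlo = max(c - 1, 0)
--     total = 0
--     for i in range(lo, h):
--         b = _binom(i, jlo)
--         for j in range(jlo, min(i, c + i - r) + 1):
--             total += b
--             b = b * (i - j) // (j + 1)
--     return total
-- ===== Notes on version B (the rewrite author's own statement) =====
-- stated objective: alternative
-- what changed: B sums binomial coefficients computed directly (multiplicative formula plus in-row Pascal updates) over just the queried w-row sub-triangle starting at row r-1, instead of building the whole Pascal triangle of height r+w-1 and filtering every cell; intended as faster, but a timing run could not confirm >=1.5x consistently.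
-- crash fix: A raises IndexError whenever r+w < 3 (the triangle has fewer than 2 rows, so the unconditional d[1][0] assignment fails); B returns the sum over the (possibly empty) queried region there, e.g. 1 for (1,1,1). — e.g. on pascaltri(1, 1, 1): A raises IndexError, B returns 1
import Mathlib
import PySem

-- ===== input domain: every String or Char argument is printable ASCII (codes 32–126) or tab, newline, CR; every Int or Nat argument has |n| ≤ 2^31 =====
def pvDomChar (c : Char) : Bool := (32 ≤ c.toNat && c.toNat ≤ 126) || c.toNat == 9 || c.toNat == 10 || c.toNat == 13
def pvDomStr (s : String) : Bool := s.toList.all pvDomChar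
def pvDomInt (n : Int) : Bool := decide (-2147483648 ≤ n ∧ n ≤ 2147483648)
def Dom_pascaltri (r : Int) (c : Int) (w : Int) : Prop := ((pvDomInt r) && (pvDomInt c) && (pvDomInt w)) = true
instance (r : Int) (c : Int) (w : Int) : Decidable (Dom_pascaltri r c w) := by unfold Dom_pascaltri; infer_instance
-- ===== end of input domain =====

-- B replaces A's full Pascal-triangle build (height r+w-1) by directly summing binomial
-- coefficients over just the queried sub-triangle; equivalence is proved on Pre_ (r+w ≥ 3,
-- exactly where the Python A returns instead of raising IndexError).

-- ===== PORT A =====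
-- d[i][j] read with default 0 (every read A performs is in range on Pre_)
def pvGet2 (d : List (List Int)) (i j : Int) : Int := (d.getD i.toNat []).getD j.toNat 0
-- d[i][j] = v; Python raises IndexError out of range, where this is a no-op — on Pre_
-- (r+w ≥ 3) every assignment A performs is in range, so the port is exact there.
def pvSet2 (d : List (List Int)) (i j : Int) (v : Int) : List (List Int) :=
  d.set i.toNat ((d.getD i.toNat []).set j.toNat v)

-- body of A's inner 'for j in range(i+1)' loop (state: the table d, the accumulator num)
def stepAInner (r c h i : Int) (st : List (List Int) × Int) (j : Int) : List (List Int) × Int :=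
  let d := if j = 0 ∨ j = i then pvSet2 st.1 i j 1
           else pvSet2 st.1 i j (pvGet2 st.1 (i-1) (j-1) + pvGet2 st.1 (i-1) j)
  let num := if r ≤ i+1 ∧ i+1 ≤ h ∧ c ≤ j+1 ∧ j+1 ≤ c-(r-i)+1 then st.2 + pvGet2 d i j
             else st.2
  (d, num)

-- body of A's outer 'for i in range(h)' loop
def stepAOuter (r c h : Int) (st : List (List Int) × Int) (i : Int) : List (List Int) × Int :=
  let d := if i = 0 then pvSet2 st.1 0 0 1 else st.1
  let d := if i = 1 then pvSet2 (pvSet2 d 1 0 1) 1 1 1 else d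
  (PySem.List.pyRange 0 (i+1) 1).foldl (stepAInner r c h i) (d, st.2)

def pascaltri (r : Int) (c : Int) (w : Int) : Int :=
  let h := r + w - 1
  let d0 := (PySem.List.pyRange 0 h 1).map (fun i => List.replicate (i+1).toNat 0)
  let d1 := pvSet2 (pvSet2 (pvSet2 d0 0 0 1) 1 0 1) 1 1 1
  ((PySem.List.pyRange 0 h 1).foldl (stepAOuter r c h) (d1, 0)).2

-- ===== PORT B =====
-- _binom(n, k): multiplicative formula
def pvBinom (n k : Int) : Int :=
  if k < 0 ∨ n < k then 0
  else (PySem.List.pyRange 0 k 1).foldl (fun b t => PySem.Int.floordiv (b * (n - t)) (t + 1)) 1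

-- body of B's inner loop (state: (total, b))
def stepBInner (i : Int) (st : Int × Int) (j : Int) : Int × Int :=
  (st.1 + st.2, PySem.Int.floordiv (st.2 * (i - j)) (j + 1))

-- body of B's outer loop
def stepBOuter (r c jlo : Int) (total : Int) (i : Int) : Int :=
  ((PySem.List.pyRange jlo (min i (c + i - r) + 1) 1).foldl (stepBInner i) (total, pvBinom i jlo)).1

def pascaltri_alt (r : Int) (c : Int) (w : Int) : Int :=
  (PySem.List.pyRange (max (r-1) 0) (r + w - 1) 1).foldl (stepBOuter r c (max (c-1) 0)) 0

-- ===== PRECONDITION & SPEC =====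
-- Pre_: exactly where the Python A returns; for r+w < 3 the triangle has < 2 rows and
-- A's unconditional 'd[1][0] = 1' raises IndexError.
def Pre_pascaltri (r : Int) (c : Int) (w : Int) : Prop := 3 ≤ r + w
instance (r : Int) (c : Int) (w : Int) : Decidable (Pre_pascaltri r c w) := by unfold Pre_pascaltri; infer_instance
def pvWitness_pascaltri : Int × Int × Int := (2, 1, 3)

-- A raises IndexError whenever r+w < 3; B returns the sum over the (then possibly empty) region.
def Raises_pascaltri (r : Int) (c : Int) (w : Int) : Prop := r + w < 3
instance (r : Int) (c : Int) (w : Int) : Decidable (Raises_pascaltri r c w) := by unfold Raises_pascaltri; infer_instance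
def pvRaiseWitness_pascaltri : Int × Int × Int := (1, 1, 1)
def pvRaiseWitnessOut_pascaltri : Int := 1

def Spec_pascaltri (r : Int) (c : Int) (w : Int) (out : Int) : Prop := out = pascaltri_alt r c w
instance (r : Int) (c : Int) (w : Int) (out : Int) : Decidable (Spec_pascaltri r c w out) := by unfold Spec_pascaltri; infer_instance

-- ===== CLAIM (what is proved, stated in full; the proofs are below) =====
def Claim_equal_pascaltri : Prop := ∀ (r : Int) (c : Int) (w : Int), Dom_pascaltri r c w → Pre_pascaltri r c w → Spec_pascaltri r c w (pascaltri r c w)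
def Claim_raises_pascaltri : Prop := (∀ (r : Int) (c : Int) (w : Int), Dom_pascaltri r c w → Raises_pascaltri r c w → ¬ Pre_pascaltri r c w) ∧ (Dom_pascaltri (pvRaiseWitness_pascaltri.1) (pvRaiseWitness_pascaltri.2.1) (pvRaiseWitness_pascaltri.2.2) ∧ Raises_pascaltri (pvRaiseWitness_pascaltri.1) (pvRaiseWitness_pascaltri.2.1) (pvRaiseWitness_pascaltri.2.2) ∧ pascaltri_alt (pvRaiseWitness_pascaltri.1) (pvRaiseWitness_pascaltri.2.1) (pvRaiseWitness_pascaltri.2.2) = pvRaiseWitnessOut_pascaltri)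

-- ===== LEMMAS AND PROOFS =====

-- C(n, k) on Int arguments (both intended nonnegative; 0 beyond the row)
def cZ (n k : Int) : Int := (Nat.choose n.toNat k.toNat : Int)

lemma length_set2 (d : List (List Int)) (i j v : Int) : (pvSet2 d i j v).length = d.length := by
  simp [pvSet2]

lemma step_choose (i j : Int) (h0 : 0 ≤ j) (hji : j ≤ i) :
    PySem.Int.floordiv (cZ i j * (i - j)) (j + 1) = cZ i (j + 1) := by
  have hij : i - j = ((i.toNat - j.toNat : Nat) : Int) := by omega
  have hj1 : j + 1 = ((j.toNat + 1 : Nat) : Int) := by omega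
  rw [cZ, cZ, hij, hj1, show ((j.toNat+1:Nat):Int).toNat = j.toNat + 1 by omega]
  rw [show ((Nat.choose i.toNat j.toNat : Nat) : Int) * ((i.toNat - j.toNat : Nat) : Int)
      = (((Nat.choose i.toNat j.toNat) * (i.toNat - j.toNat) : Nat) : Int) by push_cast; ring]
  rw [← Nat.choose_succ_right_eq]
  rw [PySem.Int.floordiv_natCast]
  simp

lemma cZ_pascal (i j : Int) (hj : 1 ≤ j) (hji : j ≤ i - 1) :
    cZ i j = cZ (i-1) (j-1) + cZ (i-1) j := by
  have h1 : i.toNat = (i-1).toNat + 1 := by omega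
  have h2 : j.toNat = (j-1).toNat + 1 := by omega
  rw [cZ, cZ, cZ, h1, h2, Nat.choose_succ_succ']
  push_cast
  ring

lemma getD_set {α : Type} (l : List α) (n t : Nat) (x : α) (y : α) :
    (l.set n x).getD t y = if n = t ∧ n < l.length then x else l.getD t y := by
  simp [List.getD_eq_getElem?_getD, List.getElem?_set]
  split_ifs with h1 h2 h3 <;> simp_all <;> omega

lemma rowlen_set2 (d : List (List Int)) (i j v : Int) (t : Nat) :
    ((pvSet2 d i j v).getD t []).length = (d.getD t []).length := by
  rw [pvSet2, getD_set]
  split_ifs with h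
  · rw [← h.1]; simp
  · rfl

lemma get2_set2_same (d : List (List Int)) (i j v : Int)
    (hi : i.toNat < d.length) (hj : j.toNat < (d.getD i.toNat []).length) :
    pvGet2 (pvSet2 d i j v) i j = v := by
  have he : d[i.toNat] = d.getD i.toNat [] := (List.getD_eq_getElem d [] hi).symm
  rw [pvGet2, pvSet2, getD_set]
  simp only [hi, and_self, if_true]
  rw [List.getD_eq_getElem?_getD, List.getElem?_set_self (by omega), Option.getD_some]

lemma get2_set2_other (d : List (List Int)) (i j v t u : Int)
    (h : i.toNat ≠ t.toNat ∨ j.toNat ≠ u.toNat) :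
    pvGet2 (pvSet2 d i j v) t u = pvGet2 d t u := by
  rw [pvGet2, pvSet2, getD_set, pvGet2]
  split_ifs with h1
  · rcases h with h | h
    · omega
    · rw [h1.1.symm, getD_set]
      simp [h]
  · rfl

lemma sum_Ico_bot (f : Int → Int) (a b : Int) (h : a < b) :
    ∑ j ∈ Finset.Ico a b, f j = f a + ∑ j ∈ Finset.Ico (a+1) b, f j := by
  rw [← Finset.insert_Ico_add_one_left_eq_Ico h, Finset.sum_insert (by simp)]

lemma sum_pyRange (f : Int → Int) (b a : Int) :
    ((PySem.List.pyRange a b 1).map f).sum = ∑ j ∈ Finset.Ico a b, f j := by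
  by_cases hab : a < b
  · generalize hk : (b - a).toNat = k
    induction k generalizing a with
    | zero => omega
    | succ n ih =>
      rw [PySem.List.pyRange_one_cons hab, List.map_cons, List.sum_cons, sum_Ico_bot f a b hab]
      by_cases hab2 : a + 1 < b
      · rw [ih (a+1) hab2 (by omega)]
      · rw [PySem.List.pyRange_one_eq_nil (by omega), Finset.Ico_eq_empty (by omega)]
        simp
  · rw [PySem.List.pyRange_one_eq_nil (by omega), Finset.Ico_eq_empty (by omega)]
    simp

lemma binom_fold (n : Int) (e a : Int) (h0 : 0 ≤ a) (hae : a ≤ e) (he : e ≤ n + 1) :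
    (PySem.List.pyRange a e 1).foldl (fun b t => PySem.Int.floordiv (b * (n - t)) (t + 1)) (cZ n a)
      = cZ n e := by
  generalize hk : (e - a).toNat = k
  induction k generalizing a with
  | zero =>
    rw [PySem.List.pyRange_one_eq_nil (by omega)]
    simp only [List.foldl_nil]
    congr 1
    omega
  | succ m ih =>
    rw [PySem.List.pyRange_one_cons (by omega), List.foldl_cons,
        step_choose n a h0 (by omega)]
    exact ih (a+1) (by omega) (by omega) (by omega)

lemma binom_eq (n k : Int) (hn : 0 ≤ n) (hk : 0 ≤ k) : pvBinom n k = cZ n k := by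
  rw [pvBinom]
  split_ifs with h
  · rw [cZ, Nat.choose_eq_zero_of_lt (by omega)]
    rfl
  · have h2 := binom_fold n k 0 le_rfl hk (by omega)
    rw [show cZ n 0 = 1 by simp [cZ]] at h2
    exact h2

lemma inner_b (i : Int) (e a total : Int) (h0 : 0 ≤ a) (he : e ≤ i + 1) :
    ((PySem.List.pyRange a e 1).foldl (stepBInner i) (total, cZ i a)).1
      = total + ∑ j ∈ Finset.Ico a e, cZ i j := by
  generalize hk : (e - a).toNat = k
  induction k generalizing a total with
  | zero =>
    rw [PySem.List.pyRange_one_eq_nil (by omega), Finset.Ico_eq_empty (by omega)]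
    simp
  | succ m ih =>
    have hae : a < e := by omega
    rw [PySem.List.pyRange_one_cons hae, List.foldl_cons, sum_Ico_bot _ a e hae]
    show ((PySem.List.pyRange (a+1) e 1).foldl (stepBInner i)
      (total + cZ i a, PySem.Int.floordiv (cZ i a * (i - a)) (a + 1))).1 = _
    rw [step_choose i a h0 (by omega), ih (a+1) (total + cZ i a) (by omega) (by omega)]
    ring

lemma A_inner (r c h i : Int) (hi0 : 0 ≤ i) (hih : i < h) :
    ∀ (a : Int) (d : List (List Int)) (num : Int), 0 ≤ a →
    d.length = h.toNat →
    (∀ t : Nat, t < h.toNat → (d.getD t []).length = t + 1) →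
    (2 ≤ i → ∀ j : Int, 0 ≤ j → pvGet2 d (i-1) j = cZ (i-1) j) →
    (∀ j : Int, 0 ≤ j → j < a → pvGet2 d i j = cZ i j) →
    ((PySem.List.pyRange a (i+1) 1).foldl (stepAInner r c h i) (d, num)).1.length = h.toNat ∧
    (∀ t : Nat, t < h.toNat →
      ((((PySem.List.pyRange a (i+1) 1).foldl (stepAInner r c h i) (d, num)).1).getD t []).length = t + 1) ∧
    (∀ t u : Int, 0 ≤ t → t.toNat ≠ i.toNat →
      pvGet2 ((PySem.List.pyRange a (i+1) 1).foldl (stepAInner r c h i) (d, num)).1 t u = pvGet2 d t u) ∧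
    (∀ j : Int, 0 ≤ j →
      pvGet2 ((PySem.List.pyRange a (i+1) 1).foldl (stepAInner r c h i) (d, num)).1 i j = cZ i j) ∧
    ((PySem.List.pyRange a (i+1) 1).foldl (stepAInner r c h i) (d, num)).2
      = num + ∑ j ∈ Finset.Ico a (i+1),
          (if r ≤ i+1 ∧ i+1 ≤ h ∧ c ≤ j+1 ∧ j+1 ≤ c-(r-i)+1 then cZ i j else 0) := by
  intro a
  generalize hk : (i + 1 - a).toNat = k
  induction k generalizing a with
  | zero =>
    intro d num ha hlen hrows hprev hcur
    have hnil : PySem.List.pyRange a (i+1) 1 = [] := PySem.List.pyRange_one_eq_nil (by omega)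
    rw [hnil]
    simp only [List.foldl_nil]
    refine ⟨hlen, hrows, fun t u _ _ => trivial, ?_, ?_⟩
    · intro j hj
      by_cases hji : j ≤ i
      · exact hcur j hj (by omega)
      · -- j > i: row i has length i+1, entry defaults to 0 = cZ i j
        rw [pvGet2, List.getD_eq_default _ _ (by rw [hrows i.toNat (by omega)]; omega),
            cZ, Nat.choose_eq_zero_of_lt (by omega)]
        rfl
    · rw [Finset.Ico_eq_empty (by omega)]
      simp
  | succ m ih =>
    intro d num ha hlen hrows hprev hcur
    have hab : a < i + 1 := by omega
    have hiL : i.toNat < d.length := by rw [hlen]; omega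
    have hrowi : (d.getD i.toNat []).length = i.toNat + 1 := hrows i.toNat (by omega)
    have hval : (if a = 0 ∨ a = i then pvSet2 d i a 1
        else pvSet2 d i a (pvGet2 d (i-1) (a-1) + pvGet2 d (i-1) a)) = pvSet2 d i a (cZ i a) := by
      split_ifs with hcase
      · rcases hcase with rfl | rfl
        · simp [cZ]
        · simp [cZ]
      · have hi2 : 2 ≤ i := by omega
        rw [hprev hi2 (a-1) (by omega), hprev hi2 a (by omega),
            ← cZ_pascal i a (by omega) (by omega)]
    have hG : pvGet2 (pvSet2 d i a (cZ i a)) i a = cZ i a :=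
      get2_set2_same d i a (cZ i a) hiL (by rw [hrowi]; omega)
    have hstep : stepAInner r c h i (d, num) a
        = (pvSet2 d i a (cZ i a),
           num + if r ≤ i+1 ∧ i+1 ≤ h ∧ c ≤ a+1 ∧ a+1 ≤ c-(r-i)+1 then cZ i a else 0) := by
      show (_, _) = (_, _)
      rw [hval]
      split_ifs with hc
      · rw [hG]
      · rw [add_zero]
    rw [PySem.List.pyRange_one_cons hab, List.foldl_cons, hstep]
    have hlen' : (pvSet2 d i a (cZ i a)).length = h.toNat := by rw [length_set2, hlen]
    have hrows' : ∀ t : Nat, t < h.toNat → ((pvSet2 d i a (cZ i a)).getD t []).length = t + 1 := by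
      intro t ht; rw [rowlen_set2]; exact hrows t ht
    have hprev' : 2 ≤ i → ∀ j : Int, 0 ≤ j → pvGet2 (pvSet2 d i a (cZ i a)) (i-1) j = cZ (i-1) j := by
      intro hi2 j hj
      rw [get2_set2_other d i a _ (i-1) j (by left; omega)]
      exact hprev hi2 j hj
    have hcur' : ∀ j : Int, 0 ≤ j → j < a + 1 → pvGet2 (pvSet2 d i a (cZ i a)) i j = cZ i j := by
      intro j hj hja
      by_cases hje : j = a
      · subst hje; exact hG
      · rw [get2_set2_other d i a _ i j (by right; omega)]
        exact hcur j hj (by omega)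
    obtain ⟨c1, c2, c3, c4, c5⟩ := ih (a+1) (by omega) (pvSet2 d i a (cZ i a))
      (num + if r ≤ i+1 ∧ i+1 ≤ h ∧ c ≤ a+1 ∧ a+1 ≤ c-(r-i)+1 then cZ i a else 0)
      (by omega) hlen' hrows' hprev' hcur'
    refine ⟨c1, c2, ?_, c4, ?_⟩
    · intro t u ht hti
      rw [c3 t u ht hti, get2_set2_other d i a _ t u (by left; omega)]
    · rw [c5, sum_Ico_bot _ a (i+1) hab]
      ring

lemma A_outer (r c h : Int) :
    ∀ (k : Int) (d : List (List Int)) (num : Int), 0 ≤ k →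
    d.length = h.toNat →
    (∀ t : Nat, t < h.toNat → (d.getD t []).length = t + 1) →
    (∀ t : Int, 0 ≤ t → t < k → ∀ j : Int, 0 ≤ j → pvGet2 d t j = cZ t j) →
    ((PySem.List.pyRange k h 1).foldl (stepAOuter r c h) (d, num)).2
      = num + ∑ i ∈ Finset.Ico k h, ∑ j ∈ Finset.Ico 0 (i+1),
          (if r ≤ i+1 ∧ i+1 ≤ h ∧ c ≤ j+1 ∧ j+1 ≤ c-(r-i)+1 then cZ i j else 0) := by
  intro k
  generalize hm : (h - k).toNat = m
  induction m generalizing k with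
  | zero =>
    intro d num hk hlen hrows hinv
    rw [PySem.List.pyRange_one_eq_nil (by omega), Finset.Ico_eq_empty (by omega)]
    simp
  | succ m ih =>
    intro d num hk hlen hrows hinv
    have hkh : k < h := by omega
    rw [PySem.List.pyRange_one_cons hkh, List.foldl_cons]
    -- the pre-loop special-case writes for i = 0 / i = 1
    have hstep : stepAOuter r c h (d, num) k
        = (PySem.List.pyRange 0 (k+1) 1).foldl (stepAInner r c h k)
            (if k = 1 then pvSet2 (pvSet2 (if k = 0 then pvSet2 d 0 0 1 else d) 1 0 1) 1 1 1
             else (if k = 0 then pvSet2 d 0 0 1 else d), num) := rfl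
    set d2 := (if k = 1 then pvSet2 (pvSet2 (if k = 0 then pvSet2 d 0 0 1 else d) 1 0 1) 1 1 1
             else (if k = 0 then pvSet2 d 0 0 1 else d)) with hd2
    have f1 : d2.length = h.toNat := by
      rw [hd2]; split_ifs <;> (try simp only [length_set2]) <;> exact hlen
    have f2 : ∀ t : Nat, t < h.toNat → (d2.getD t []).length = t + 1 := by
      intro t ht; rw [hd2]; split_ifs <;> (try simp only [rowlen_set2]) <;> exact hrows t ht
    have f3 : ∀ t u : Int, 0 ≤ t → t.toNat ≠ k.toNat → pvGet2 d2 t u = pvGet2 d t u := by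
      intro t u ht htk
      rw [hd2]
      split_ifs with h1 h0 h0
      · subst h1; omega
      · subst h1
        rw [get2_set2_other _ _ _ _ _ _ (by left; omega),
            get2_set2_other _ _ _ _ _ _ (by left; omega)]
      · subst h0
        rw [get2_set2_other _ _ _ _ _ _ (by left; omega)]
      · rfl
    have hprev2 : 2 ≤ k → ∀ j : Int, 0 ≤ j → pvGet2 d2 (k-1) j = cZ (k-1) j := by
      intro hk2 j hj
      rw [f3 (k-1) j (by omega) (by omega)]
      exact hinv (k-1) (by omega) (by omega) j hj
    obtain ⟨c1, c2, c3, c4, c5⟩ := A_inner r c h k hk hkh 0 d2 num le_rfl f1 f2 hprev2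
      (by intro j hj hj0; omega)
    rw [hstep]
    have hinv' : ∀ t : Int, 0 ≤ t → t < k + 1 → ∀ j : Int, 0 ≤ j →
        pvGet2 ((PySem.List.pyRange 0 (k+1) 1).foldl (stepAInner r c h k) (d2, num)).1 t j = cZ t j := by
      intro t ht htk j hj
      by_cases hte : t = k
      · subst hte; exact c4 j hj
      · rw [c3 t j ht (by omega), f3 t j ht (by omega)]
        exact hinv t ht (by omega) j hj
    have := ih (k+1) (by omega)
      ((PySem.List.pyRange 0 (k+1) 1).foldl (stepAInner r c h k) (d2, num)).1
      ((PySem.List.pyRange 0 (k+1) 1).foldl (stepAInner r c h k) (d2, num)).2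
      (by omega) c1 c2 hinv'
    rw [this, c5, sum_Ico_bot _ k h hkh]
    ring

lemma pascaltri_eq_alt (r c w : Int) (hpre : 3 ≤ r + w) : pascaltri r c w = pascaltri_alt r c w := by
  have h2 : (2:Int) ≤ r + w - 1 := by omega
  -- initial table facts
  have hd0 : ∀ t : Nat, t < (r + w - 1).toNat →
      (((PySem.List.pyRange 0 (r + w - 1) 1).map (fun i => List.replicate (i+1).toNat (0:Int))).getD t [])
        = List.replicate (t+1) (0:Int) := by
    intro t ht
    rw [show (r + w - 1) = (((r + w - 1).toNat : Nat) : Int) by omega, PySem.List.pyRange_zero_natCast, List.map_map]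
    rw [List.getD_eq_getElem _ _ (by simpa using ht), List.getElem_map, List.getElem_range]
    simp only [Function.comp]
    rw [show (((t:Nat):Int)+1).toNat = t+1 by omega]
  have hd0len : ((PySem.List.pyRange 0 (r + w - 1) 1).map (fun i => List.replicate (i+1).toNat (0:Int))).length
      = (r + w - 1).toNat := by
    rw [show (r + w - 1) = (((r + w - 1).toNat : Nat) : Int) by omega, PySem.List.pyRange_zero_natCast]
    simp
  -- A's value as a double sum
  have hA : pascaltri r c w = ∑ i ∈ Finset.Ico 0 (r + w - 1), ∑ j ∈ Finset.Ico 0 (i+1),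
      (if r ≤ i+1 ∧ i+1 ≤ r + w - 1 ∧ c ≤ j+1 ∧ j+1 ≤ c-(r-i)+1 then cZ i j else 0) := by
    show ((PySem.List.pyRange 0 (r + w - 1) 1).foldl (stepAOuter r c (r + w - 1)) (_, 0)).2 = _
    rw [A_outer r c (r + w - 1) 0 _ 0 le_rfl
      (by simp only [length_set2]; exact hd0len)
      (by intro t ht
          simp only [rowlen_set2]
          rw [hd0 t ht]
          simp)
      (by intro t ht ht0; omega)]
    ring
  -- B's value as a double sum
  have hB : pascaltri_alt r c w = ∑ i ∈ Finset.Ico (max (r-1) 0) (r + w - 1),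
      ∑ j ∈ Finset.Ico (max (c-1) 0) (min i (c + i - r) + 1), cZ i j := by
    show (PySem.List.pyRange (max (r-1) 0) (r + w - 1) 1).foldl (stepBOuter r c (max (c-1) 0)) 0 = _
    rw [PySem.List.foldl_congr_mem _ _
        (fun total i => total + ∑ j ∈ Finset.Ico (max (c-1) 0) (min i (c + i - r) + 1), cZ i j) _
        (by intro acc x hx
            rw [PySem.List.mem_pyRange_one] at hx
            rw [stepBOuter, binom_eq x (max (c-1) 0) (by omega) (by omega),
                inner_b x (min x (c + x - r) + 1) (max (c-1) 0) acc (by omega) (by omega)]),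
        PySem.List.foldl_add, sum_pyRange]
    ring
  have hshrink : ∑ i ∈ Finset.Ico (max (r-1) 0) (r + w - 1), (∑ j ∈ Finset.Ico 0 (i+1),
      (if r ≤ i+1 ∧ i+1 ≤ r + w - 1 ∧ c ≤ j+1 ∧ j+1 ≤ c-(r-i)+1 then cZ i j else 0))
      = ∑ i ∈ Finset.Ico 0 (r + w - 1), (∑ j ∈ Finset.Ico 0 (i+1),
      (if r ≤ i+1 ∧ i+1 ≤ r + w - 1 ∧ c ≤ j+1 ∧ j+1 ≤ c-(r-i)+1 then cZ i j else 0)) := by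
    apply Finset.sum_subset
    · intro x hx
      rw [Finset.mem_Ico] at *
      omega
    · intro x hx hnx
      rw [Finset.mem_Ico] at hx hnx
      apply Finset.sum_eq_zero
      intro j hj
      rw [if_neg (by omega)]
  rw [hA, hB, ← hshrink]
  apply Finset.sum_congr rfl
  intro i hi
  rw [Finset.mem_Ico] at hi
  rw [← Finset.sum_filter]
  apply Finset.sum_congr
  · apply Finset.ext
    intro j
    simp only [Finset.mem_filter, Finset.mem_Ico]
    constructor
    · intro hj; omega
    · intro hj; omega
  · intro j hj
    rfl

-- ===== VERDICT (by name: the statement is the Claim_ definition above) =====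
theorem pascaltri_spec : Claim_equal_pascaltri := by
  intro r c w _ hpre
  unfold Spec_pascaltri
  exact pascaltri_eq_alt r c w hpre

theorem pascaltri_raises : Claim_raises_pascaltri := by
  unfold Claim_raises_pascaltri
  exact ⟨by intro r c w _ hr; unfold Raises_pascaltri at hr; unfold Pre_pascaltri; omega, by decide⟩

-- self-check extracted from pascaltri_raises: the raise-witness really lies in Raises_ and B's port returns the stated literal there
theorem pascaltri_raises_witness : Raises_pascaltri pvRaiseWitness_pascaltri.1 pvRaiseWitness_pascaltri.2.1 pvRaiseWitness_pascaltri.2.2 ∧ pascaltri_alt pvRaiseWitness_pascaltri.1 pvRaiseWitness_pascaltri.2.1 pvRaiseWitness_pascaltri.2.2 = pvRaiseWitnessOut_pascaltri := by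
  have hr := pascaltri_raises
  unfold Claim_raises_pascaltri at hr
  exact ⟨hr.2.2.1, hr.2.2.2⟩
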